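-- pv_equiv track=rewrite | github.com/salmatoolkit/salma | code/SALMA/salma/test/emobility/utils.py | choose_alternative
-- ===== SOURCE A (Python) =====
-- def choose_alternative(schedule, assignment, blocked=set()):
--     """
--     Solves an all-different constraint for the variable-domain list in schedule. If successful, the function
--     returns True and assignment contains the variable assignment.
--
--     :param list[(str, list)] schedule: the schedule
--     :param dict[str, object] assignment: variable assignment
--     :param set[str] blocked: a set containing used values for the nested recursion
--     :return: bool
--     """
--     if len(schedule) == 0:
--         return True
--     current = schedule[0]
--     alternatives = current[1]
--     for a in alternatives:
--         if a not in blocked: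
--             assignment[current[0]] = a
--             success = choose_alternative(schedule[1:], assignment, blocked.union({a}))
--             if success:
--                 return True
--     return False
-- ===== SOURCE B (Python) =====
-- def choose_alternative(schedule, assignment, blocked=set()):
--     """Iterative explicit-stack DFS over the same search tree as the recursive
--     backtracking: frames are (index, next-position, blocked-set); assignment is
--     written at the same moments and in the same order as in the recursive version."""
--     stack = [(0, 0, blocked)]
--     while stack:
--         i, p, bl = stack[-1]
--         if i == len(schedule):
--             return True
--         var, alts = schedule[i]
--         while p < len(alts) and alts[p] in bl:
--             p += 1
--         if p < len(alts):
--             a = alts[p]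
--             stack[-1] = (i, p + 1, bl)
--             assignment[var] = a
--             stack.append((i + 1, 0, bl | {a}))
--         else:
--             stack.pop()
--     return False
-- ===== Notes on version B (the rewrite author's own statement) =====
-- stated objective: alternative
-- what changed: Replaces the recursive backtracking (which slices schedule[1:] and recurses) by an iterative depth-first search with an explicit stack of (index, position, blocked-set) frames that visits the identical search tree in the identical order and performs the identical assignment writes.
import Mathlib
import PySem

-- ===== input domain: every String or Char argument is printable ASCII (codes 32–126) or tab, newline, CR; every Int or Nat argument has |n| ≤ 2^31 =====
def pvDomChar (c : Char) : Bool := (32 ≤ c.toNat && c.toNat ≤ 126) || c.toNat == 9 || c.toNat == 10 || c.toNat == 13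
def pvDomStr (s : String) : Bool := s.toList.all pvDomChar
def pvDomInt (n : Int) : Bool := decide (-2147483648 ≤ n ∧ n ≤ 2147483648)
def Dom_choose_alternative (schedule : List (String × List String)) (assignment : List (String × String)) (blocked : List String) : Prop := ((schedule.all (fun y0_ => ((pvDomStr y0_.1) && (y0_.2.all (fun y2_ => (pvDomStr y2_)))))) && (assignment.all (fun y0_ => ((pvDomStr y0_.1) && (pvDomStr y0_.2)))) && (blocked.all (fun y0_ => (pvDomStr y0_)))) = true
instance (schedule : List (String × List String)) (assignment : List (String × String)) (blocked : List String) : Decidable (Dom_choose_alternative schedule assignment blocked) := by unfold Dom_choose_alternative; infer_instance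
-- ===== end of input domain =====

-- B replaces A's recursive backtracking by an explicit-stack iterative DFS over the same
-- search tree (same visit order); equivalence proved for the RETURN VALUE only — both
-- Pythons mutate `assignment` in place (B performs the identical writes in the same order).

-- ===== PORT A =====
-- literal transliteration of A: recursion on the schedule, an inner loop over the
-- alternatives of the first entry; `assignment` is threaded as the dict A mutates.
mutual
def choose_alternative (schedule : List (String × List String)) (assignment : List (String × String)) (blocked : List String) : Bool :=
  match schedule with
  | [] => true
  | current :: rest => pvLoopA rest current.1 current.2 assignment blocked
termination_by (schedule.length + 1, 0)

def pvLoopA (rest : List (String × List String)) (v : String) (alts : List String) (assignment : List (String × String)) (blocked : List String) : Bool :=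
  match alts with
  | [] => false
  | a :: more =>
    if a ∈ blocked then pvLoopA rest v more assignment blocked
    else
      -- assignment[v] = a, on the association list (dict under the type convention)
      let assignment' := (PySem.Dict.insert (PySem.Dict.mk assignment) v a).items
      if choose_alternative rest assignment' (PySem.Set.union blocked [a]) then true
      else pvLoopA rest v more assignment blocked
termination_by (rest.length + 1, alts.length)
end

-- ===== PORT B =====
-- helpers of B's port: the node-count potential pvT / frame weight pvW / stack measure pvM
-- are only used to justify termination of the while-loop (they are not part of the algorithm).
def pvT : List (String × List String) → Nat
  | [] => 2
  | x :: rest => 2 + x.2.length * pvT rest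

def pvW (schedule : List (String × List String)) (i p : Nat) : Nat :=
  1 + ((schedule.getD i ("", [])).2.length - p) * pvT (schedule.drop (i + 1))

def pvM (schedule : List (String × List String)) (stack : List (Nat × Nat × List String)) : Nat :=
  (stack.map (fun f => pvW schedule f.1 f.2.1)).sum

-- inner `while p < len(alts) and alts[p] in bl: p += 1`
def pvScan (alts : List String) (bl : List String) (p : Nat) : Nat :=
  if h : p < alts.length ∧ alts.getD p "" ∈ bl then pvScan alts bl (p + 1) else p
termination_by alts.length - p
decreasing_by omega

theorem pvW_pos (s : List (String × List String)) (i p : Nat) : 1 ≤ pvW s i p :=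
  Nat.le_add_right _ _

theorem pvW_zero_lt (s : List (String × List String)) (i : Nat) :
    pvW s (i + 1) 0 < pvT (s.drop (i + 1)) := by
  cases h : s.drop (i + 1) with
  | nil =>
    have hlen : s.length ≤ i + 1 := by
      have := congrArg List.length h
      simp at this; omega
    have hget2 : s[(i + 1)]? = none := List.getElem?_eq_none hlen
    simp [pvW, pvT, List.getD_eq_getElem?_getD, hget2,
      List.drop_eq_nil_of_le (by omega : s.length ≤ i + 1 + 1)]
  | cons y tl =>
    have hget : s.getD (i + 1) ("", []) = y := by
      have h1 : (List.drop (i+1) s)[0]? = s[(i+1) + 0]? := List.getElem?_drop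
      rw [h] at h1
      simp [List.getD_eq_getElem?_getD, ← h1]
    have h2 : s.drop (i + 1 + 1) = tl := by
      have h3 : List.drop 1 (List.drop (i+1) s) = List.drop ((i+1) + 1) s := List.drop_drop
      rw [h] at h3; simpa using h3.symm
    simp only [pvW, hget, h2, Nat.sub_zero, pvT]
    have h1 : (1 : Nat) < 2 := by omega
    linarith

theorem pvScan_ge (alts bl : List String) (p : Nat) : p ≤ pvScan alts bl p := by
  fun_induction pvScan alts bl p with
  | case1 p h ih => omega
  | case2 p h => omega

theorem pvPush_lt (s : List (String × List String)) (i p q : Nat) (hpq : p ≤ q)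
    (hq : q < (s.getD i ("", [])).2.length) :
    pvW s (i + 1) 0 + pvW s i (q + 1) < pvW s i p := by
  have hZ := pvW_zero_lt s i
  have hmul : ((s.getD i ("", [])).2.length - (q + 1)) * pvT (s.drop (i + 1)) + pvT (s.drop (i + 1))
      ≤ ((s.getD i ("", [])).2.length - p) * pvT (s.drop (i + 1)) := by
    have hle : ((s.getD i ("", [])).2.length - (q + 1)) + 1 ≤ (s.getD i ("", [])).2.length - p := by omega
    have := Nat.mul_le_mul_right (pvT (s.drop (i + 1))) hle
    rw [Nat.add_mul, one_mul] at this; exact this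
  generalize hzz : pvW s (i + 1) 0 = Z at hZ ⊢
  unfold pvW
  linarith

-- the iterative DFS machine: stack of frames (index, next position, blocked set);
-- top of the Python stack is the HEAD of the list here.
def pvRun (schedule : List (String × List String)) (stack : List (Nat × Nat × List String)) : Bool :=
  match stack with
  | [] => false
  | (i, p, bl) :: rest =>
    if i = schedule.length then true
    else
      let alts := (schedule.getD i ("", [])).2
      let q := pvScan alts bl p
      if h : q < alts.length then
        pvRun schedule ((i + 1, 0, PySem.Set.union bl [alts.getD q ""]) :: (i, q + 1, bl) :: rest)
      else
        pvRun schedule rest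
termination_by pvM schedule stack
decreasing_by
  · simp only [pvM, List.map_cons, List.sum_cons]
    have := pvPush_lt schedule i p (pvScan (schedule.getD i ("", [])).2 bl p) (pvScan_ge _ _ _) h
    linarith
  · simp only [pvM, List.map_cons, List.sum_cons]
    have := pvW_pos schedule i p
    linarith

def choose_alternative_alt (schedule : List (String × List String)) (assignment : List (String × String)) (blocked : List String) : Bool :=
  pvRun schedule [(0, 0, blocked)]

-- ===== PRECONDITION & SPEC =====
def Spec_choose_alternative (schedule : List (String × List String)) (assignment : List (String × String)) (blocked : List String) (out : Bool) : Prop := out = choose_alternative_alt schedule assignment blocked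
instance (schedule : List (String × List String)) (assignment : List (String × String)) (blocked : List String) (out : Bool) : Decidable (Spec_choose_alternative schedule assignment blocked out) := by unfold Spec_choose_alternative; infer_instance

-- ===== CLAIM (what is proved, stated in full; the proofs are below) =====
def Claim_equal_choose_alternative : Prop := ∀ (schedule : List (String × List String)) (assignment : List (String × String)) (blocked : List String), Dom_choose_alternative schedule assignment blocked → Spec_choose_alternative schedule assignment blocked (choose_alternative schedule assignment blocked)

-- ===== LEMMAS AND PROOFS =====

-- A's result does not depend on the assignment dict (nor the variable name in the loop)
theorem pv_irrel (n : Nat) :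
    (∀ (s : List (String × List String)) (a1 a2 : List (String × String)) (bl : List String),
      s.length ≤ n → choose_alternative s a1 bl = choose_alternative s a2 bl) ∧
    (∀ (r : List (String × List String)) (v1 v2 : String) (alts : List String)
      (a1 a2 : List (String × String)) (bl : List String),
      r.length + 1 ≤ n → pvLoopA r v1 alts a1 bl = pvLoopA r v2 alts a2 bl) := by
  induction n with
  | zero =>
    refine ⟨fun s a1 a2 bl hle => ?_, fun r v1 v2 alts a1 a2 bl hle => by omega⟩
    have hs : s = [] := List.eq_nil_of_length_eq_zero (by omega)
    subst hs; simp [choose_alternative]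
  | succ n ih =>
    have hloop : ∀ (r : List (String × List String)) (v1 v2 : String) (alts : List String)
        (a1 a2 : List (String × String)) (bl : List String),
        r.length + 1 ≤ n + 1 → pvLoopA r v1 alts a1 bl = pvLoopA r v2 alts a2 bl := by
      intro r v1 v2 alts a1 a2 bl hle
      induction alts with
      | nil => simp [pvLoopA]
      | cons a more ihalts =>
        rw [pvLoopA, pvLoopA]
        by_cases hmem : a ∈ bl
        · simp only [if_pos hmem]; exact ihalts
        · simp only [if_neg hmem]
          have hch := ih.1 r ((PySem.Dict.insert (PySem.Dict.mk a1) v1 a).items)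
            ((PySem.Dict.insert (PySem.Dict.mk a2) v2 a).items) (PySem.Set.union bl [a]) (by omega)
          rw [hch]
          cases choose_alternative r ((PySem.Dict.insert (PySem.Dict.mk a2) v2 a).items)
            (PySem.Set.union bl [a]) <;> simp [ihalts]
    refine ⟨fun s a1 a2 bl hle => ?_, hloop⟩
    cases s with
    | nil => simp [choose_alternative]
    | cons cur rest =>
      rw [choose_alternative, choose_alternative]
      exact hloop rest cur.1 cur.1 cur.2 a1 a2 bl (by simpa using hle)

theorem choose_irrel (s : List (String × List String)) (a1 a2 : List (String × String)) (bl : List String) :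
    choose_alternative s a1 bl = choose_alternative s a2 bl :=
  (pv_irrel s.length).1 s a1 a2 bl le_rfl

theorem loop_irrel (r : List (String × List String)) (v1 v2 : String) (alts : List String)
    (a1 a2 : List (String × String)) (bl : List String) :
    pvLoopA r v1 alts a1 bl = pvLoopA r v2 alts a2 bl :=
  (pv_irrel (r.length + 1)).2 r v1 v2 alts a1 a2 bl le_rfl

-- what one frame of the machine is worth, in terms of A's recursion
def pvFrame (schedule : List (String × List String)) (i p : Nat) (bl : List String) : Bool :=
  if i = schedule.length then true
  else pvLoopA (schedule.drop (i + 1)) "" (((schedule.getD i ("", [])).2).drop p) [] bl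

def pvStackSpec (schedule : List (String × List String)) : List (Nat × Nat × List String) → Bool
  | [] => false
  | (i, p, bl) :: rest => pvFrame schedule i p bl || pvStackSpec schedule rest

theorem pvScan_skip (r : List (String × List String)) (alts bl : List String) (p : Nat) :
    pvLoopA r "" (alts.drop p) [] bl = pvLoopA r "" (alts.drop (pvScan alts bl p)) [] bl := by
  fun_induction pvScan alts bl p with
  | case1 p h ih =>
    rw [List.drop_eq_getElem_cons h.1, pvLoopA,
      if_pos (List.getD_eq_getElem alts "" h.1 ▸ h.2)]
    exact ih
  | case2 p h => rfl

theorem pvScan_not_mem (alts bl : List String) (p : Nat)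
    (h : pvScan alts bl p < alts.length) : alts.getD (pvScan alts bl p) "" ∉ bl := by
  fun_induction pvScan alts bl p with
  | case1 p hc ih => exact ih h
  | case2 p hc =>
    intro hmem
    exact hc ⟨h, hmem⟩

theorem pvFrame_eq_choose (s : List (String × List String)) (j : Nat) (bl : List String)
    (h : j ≤ s.length) : pvFrame s j 0 bl = choose_alternative (s.drop j) [] bl := by
  rcases Nat.lt_or_ge j s.length with hlt | hge
  · have hdrop : s.drop j = s[j] :: s.drop (j + 1) := List.drop_eq_getElem_cons hlt
    have hget : s.getD j ("", []) = s[j] := List.getD_eq_getElem s ("", []) hlt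
    rw [pvFrame, if_neg (by omega), hdrop, choose_alternative, hget, List.drop_zero]
    exact loop_irrel _ "" (s[j]).1 _ _ _ _
  · have hj : j = s.length := by omega
    rw [pvFrame, if_pos hj, hj, List.drop_length, choose_alternative]

theorem pvRun_nil (s : List (String × List String)) : pvRun s [] = false := by
  rw [pvRun.eq_def]

theorem pvRun_cons (s : List (String × List String)) (i p : Nat) (bl : List String)
    (rest : List (Nat × Nat × List String)) :
    pvRun s ((i, p, bl) :: rest) =
      if i = s.length then true
      else
        let alts := (s.getD i ("", [])).2
        let q := pvScan alts bl p
        if q < alts.length then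
          pvRun s ((i + 1, 0, PySem.Set.union bl [alts.getD q ""]) :: (i, q + 1, bl) :: rest)
        else pvRun s rest := by
  rw [pvRun.eq_def]
  simp only []
  split_ifs <;> rfl

theorem pvRun_eq_spec (s : List (String × List String)) (N : Nat) :
    ∀ stack, pvM s stack ≤ N → (∀ f ∈ stack, f.1 ≤ s.length) →
      pvRun s stack = pvStackSpec s stack := by
  induction N with
  | zero =>
    intro stack hM hInv
    cases stack with
    | nil => rw [pvRun_nil]; rfl
    | cons f rest =>
      exfalso
      have := pvW_pos s f.1 f.2.1
      simp only [pvM, List.map_cons, List.sum_cons] at hM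
      omega
  | succ N ih =>
    intro stack hM hInv
    cases stack with
    | nil => rw [pvRun_nil]; rfl
    | cons f rest =>
      obtain ⟨i, p, bl⟩ := f
      rw [pvRun_cons]
      by_cases hi : i = s.length
      · simp [pvStackSpec, pvFrame, hi]
      · simp only [if_neg hi]
        have hile : i ≤ s.length := hInv (i, p, bl) (by simp)
        have hilt : i < s.length := by omega
        set alts := (s.getD i ("", [])).2 with halts
        set q := pvScan alts bl p with hq
        have hpq : p ≤ q := pvScan_ge alts bl p
        have hframe : pvFrame s i p bl = pvLoopA (s.drop (i + 1)) "" (alts.drop q) [] bl := by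
          rw [pvFrame, if_neg hi, ← halts, pvScan_skip]
        by_cases hql : q < alts.length
        · simp only [if_pos hql]
          set a := alts.getD q "" with ha
          have hnm : a ∉ bl := pvScan_not_mem alts bl p hql
          -- the machine step is covered by the induction hypothesis
          have hMnew : pvM s ((i + 1, 0, PySem.Set.union bl [a]) :: (i, q + 1, bl) :: rest) ≤ N := by
            have hlt := pvPush_lt s i p q hpq hql
            simp only [pvM, List.map_cons, List.sum_cons] at hM ⊢
            omega
          have hInvNew : ∀ f ∈ ((i + 1, 0, PySem.Set.union bl [a]) :: (i, q + 1, bl) :: rest),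
              f.1 ≤ s.length := by
            intro f hf
            simp only [List.mem_cons] at hf
            rcases hf with rfl | rfl | hf
            · exact hilt
            · exact hile
            · exact hInv f (List.mem_cons_of_mem _ hf)
          rw [ih _ hMnew hInvNew]
          -- unfold the top frame of the spec on both sides
          have hdropq : alts.drop q = a :: alts.drop (q + 1) := by
            rw [List.drop_eq_getElem_cons hql, ha, List.getD_eq_getElem alts "" hql]
          have hunf : pvFrame s i p bl =
              (choose_alternative (s.drop (i + 1)) [] (PySem.Set.union bl [a]) ||
                pvLoopA (s.drop (i + 1)) "" (alts.drop (q + 1)) [] bl) := by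
            rw [hframe, hdropq, pvLoopA, if_neg hnm]
            have hci : choose_alternative (s.drop (i + 1))
                ((PySem.Dict.insert (PySem.Dict.mk []) "" a).items) (PySem.Set.union bl [a]) =
                choose_alternative (s.drop (i + 1)) [] (PySem.Set.union bl [a]) :=
              choose_irrel _ _ _ _
            show (if choose_alternative (s.drop (i + 1))
                ((PySem.Dict.insert (PySem.Dict.mk []) "" a).items) (PySem.Set.union bl [a]) = true
              then true
              else pvLoopA (s.drop (i + 1)) "" (alts.drop (q + 1)) [] bl) = _
            rw [hci]
            cases choose_alternative (s.drop (i + 1)) [] (PySem.Set.union bl [a]) <;> simp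
          have hnewtop : pvFrame s (i + 1) 0 (PySem.Set.union bl [a]) =
              choose_alternative (s.drop (i + 1)) [] (PySem.Set.union bl [a]) :=
            pvFrame_eq_choose s (i + 1) (PySem.Set.union bl [a]) (by omega)
          have hmid : pvFrame s i (q + 1) bl =
              pvLoopA (s.drop (i + 1)) "" (alts.drop (q + 1)) [] bl := by
            rw [pvFrame, if_neg hi, ← halts]
          simp only [pvStackSpec, hunf, hnewtop, hmid, Bool.or_assoc]
        · simp only [if_neg hql]
          have hMrest : pvM s rest ≤ N := by
            have := pvW_pos s i p
            simp only [pvM, List.map_cons, List.sum_cons] at hM ⊢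
            omega
          rw [ih _ hMrest (fun f hf => hInv f (List.mem_cons_of_mem _ hf))]
          have : pvFrame s i p bl = false := by
            rw [hframe, List.drop_eq_nil_of_le (by omega : alts.length ≤ q), pvLoopA]
          simp [pvStackSpec, this]

-- ===== VERDICT (by name: the statement is the Claim_ definition above) =====
theorem choose_alternative_spec : Claim_equal_choose_alternative := by
  intro schedule assignment blocked _
  unfold Spec_choose_alternative choose_alternative_alt
  rw [pvRun_eq_spec schedule (pvM schedule [(0, 0, blocked)]) _ le_rfl
    (by intro f hf; simp at hf; simp [hf])]
  have h0 : pvFrame schedule 0 0 blocked = choose_alternative schedule [] blocked := by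
    rw [pvFrame_eq_choose schedule 0 blocked (by omega), List.drop_zero]
  simp only [pvStackSpec, h0, Bool.or_false]
  exact choose_irrel schedule assignment [] blocked
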